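-- pv_equiv track=rewrite | github.com/marwan-aridi/Digital-Image-Processing | Project 3/region_analysis/shape_counting.py | count_shapes
-- ===== SOURCE A (Python) =====
-- def count_shapes(shapes_data):
--     circles, ellipses, rectangles, squares = 0, 0, 0, 0
--     for all_shapes in shapes_data:
--         shape_type = shapes_data[all_shapes]["Shape"]
--         if shape_type == 'c':
--             circles += 1
--         elif shape_type == 'e':
--             ellipses += 1
--         elif shape_type == 'r':
--             rectangles += 1
--         elif shape_type == 's':
--             squares += 1
--
--     return {
--         "circles": circles,
--         "ellipses": ellipses,
--         "rectangles": rectangles,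
--         "squares": squares
--     }
-- ===== SOURCE B (Python) =====
-- def count_shapes(shapes_data):
--     shapes = [v["Shape"] for v in shapes_data.values()]
--     return {name: shapes.count(t)
--             for name, t in (("circles", "c"), ("ellipses", "e"),
--                             ("rectangles", "r"), ("squares", "s"))}
-- ===== Notes on version B (the rewrite author's own statement) =====
-- stated objective: idiomatic
-- what changed: B extracts the list of Shape fields once and builds the result with a dict comprehension using list.count per target type, instead of A's key-indexed loop with four explicit accumulators and an if/elif cascade.
import Mathlib
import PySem

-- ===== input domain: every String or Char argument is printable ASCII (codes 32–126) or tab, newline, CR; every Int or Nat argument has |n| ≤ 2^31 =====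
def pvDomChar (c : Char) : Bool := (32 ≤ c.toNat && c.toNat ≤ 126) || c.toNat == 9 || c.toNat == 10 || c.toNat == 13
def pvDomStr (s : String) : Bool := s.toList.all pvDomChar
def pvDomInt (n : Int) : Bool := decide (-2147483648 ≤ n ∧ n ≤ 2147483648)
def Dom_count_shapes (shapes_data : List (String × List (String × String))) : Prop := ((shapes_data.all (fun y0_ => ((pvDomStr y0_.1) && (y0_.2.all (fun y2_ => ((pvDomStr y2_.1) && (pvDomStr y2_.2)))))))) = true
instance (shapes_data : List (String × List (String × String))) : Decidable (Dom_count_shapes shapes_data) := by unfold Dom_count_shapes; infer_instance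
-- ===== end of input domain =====

-- B extracts the Shape fields once and counts each of the four types with list.count (idiomatic), instead of A's key-indexed loop with four accumulators.


-- ===== PORT A =====
-- for-loop over the dict's keys; shapes_data[k]["Shape"] is a first-match lookup
-- (assoc-list dict convention); four accumulators updated by the if/elif cascade.
def count_shapes (shapes_data : List (String × List (String × String))) : List (String × Int) :=
  let st : Int × Int × Int × Int :=
    (shapes_data.map (·.1)).foldl
      (fun acc k =>
        let shape := (((shapes_data.lookup k).getD []).lookup "Shape").getD ""
        if shape = "c" then (acc.1 + 1, acc.2.1, acc.2.2.1, acc.2.2.2)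
        else if shape = "e" then (acc.1, acc.2.1 + 1, acc.2.2.1, acc.2.2.2)
        else if shape = "r" then (acc.1, acc.2.1, acc.2.2.1 + 1, acc.2.2.2)
        else if shape = "s" then (acc.1, acc.2.1, acc.2.2.1, acc.2.2.2 + 1)
        else acc)
      (0, 0, 0, 0)
  [("circles", st.1), ("ellipses", st.2.1), ("rectangles", st.2.2.1), ("squares", st.2.2.2)]

-- ===== PORT B =====
-- collect the Shape field of every value once, then count each target type.
def count_shapes_alt (shapes_data : List (String × List (String × String))) : List (String × Int) :=
  let shapes := shapes_data.map (fun p => ((p.2.lookup "Shape").getD ""))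
  [("circles", PySem.List.count shapes "c"), ("ellipses", PySem.List.count shapes "e"),
   ("rectangles", PySem.List.count shapes "r"), ("squares", PySem.List.count shapes "s")]

-- ===== PRECONDITION & SPEC =====
-- Pre_ excludes inputs where some value dict lacks a "Shape" key (Python A raises
-- KeyError there) and assoc lists with duplicate outer keys (not representable as a
-- Python dict, on which the key-indexed lookup order is an artefact of the encoding).
def Pre_count_shapes (shapes_data : List (String × List (String × String))) : Prop :=
  (shapes_data.map (·.1)).Nodup ∧ ∀ p ∈ shapes_data, (p.2.lookup "Shape").isSome = true
instance (shapes_data : List (String × List (String × String))) : Decidable (Pre_count_shapes shapes_data) := by unfold Pre_count_shapes; infer_instance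

def pvWitness_count_shapes : (List (String × List (String × String))) :=
  [("a", [("Shape", "c")]), ("b", [("Shape", "s")])]

def Spec_count_shapes (shapes_data : List (String × List (String × String))) (out : List (String × Int)) : Prop := out = count_shapes_alt shapes_data
instance (shapes_data : List (String × List (String × String))) (out : List (String × Int)) : Decidable (Spec_count_shapes shapes_data out) := by unfold Spec_count_shapes; infer_instance

-- ===== CLAIM (what is proved, stated in full; the proofs are below) =====
def Claim_equal_count_shapes : Prop := ∀ (shapes_data : List (String × List (String × String))), Dom_count_shapes shapes_data → Pre_count_shapes shapes_data → Spec_count_shapes shapes_data (count_shapes shapes_data)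

-- ===== LEMMAS AND PROOFS =====

-- A's four-accumulator fold over a list of shape strings computes the four counts.
theorem foldA_counts (l : List String) (a b c d : Int) :
    l.foldl
      (fun (acc : Int × Int × Int × Int) shape =>
        if shape = "c" then (acc.1 + 1, acc.2.1, acc.2.2.1, acc.2.2.2)
        else if shape = "e" then (acc.1, acc.2.1 + 1, acc.2.2.1, acc.2.2.2)
        else if shape = "r" then (acc.1, acc.2.1, acc.2.2.1 + 1, acc.2.2.2)
        else if shape = "s" then (acc.1, acc.2.1, acc.2.2.1, acc.2.2.2 + 1)
        else acc)
      (a, b, c, d)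
    = (a + l.count "c", b + l.count "e", c + l.count "r", d + l.count "s") := by
  induction l generalizing a b c d with
  | nil => simp
  | cons x xs ih =>
    simp only [List.foldl_cons]
    by_cases h1 : x = "c"
    · subst h1; rw [ih]; simp [Prod.ext_iff]; omega
    rw [if_neg h1]
    by_cases h2 : x = "e"
    · subst h2; rw [ih]; simp [Prod.ext_iff, h1]; omega
    rw [if_neg h2]
    by_cases h3 : x = "r"
    · subst h3; rw [ih]; simp [Prod.ext_iff, h1, h2]; omega
    rw [if_neg h3]
    by_cases h4 : x = "s"
    · subst h4; rw [ih]; simp [Prod.ext_iff, h1, h2, h3]; omega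
    rw [if_neg h4, ih]
    simp [h1, h2, h3, h4]

-- under nodup outer keys, the first-match lookup by a pair's key returns that pair's value
theorem lookup_self (sd : List (String × List (String × String)))
    (hnd : (sd.map (·.1)).Nodup) (p : String × List (String × String)) (hp : p ∈ sd) :
    sd.lookup p.1 = some p.2 := by
  induction sd with
  | nil => simp at hp
  | cons q sd ih =>
    simp only [List.map_cons, List.nodup_cons] at hnd
    rw [List.mem_cons] at hp
    rcases hp with rfl | hp
    · simp [List.lookup]
    · have hne : (p.1 == q.1) = false := by
        simp only [beq_eq_false_iff_ne]
        intro h; exact hnd.1 (h ▸ List.mem_map_of_mem hp)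
      simp [List.lookup, hne]
      exact ih hnd.2 hp

-- ===== VERDICT (by name: the statement is the Claim_ definition above) =====
theorem count_shapes_spec : Claim_equal_count_shapes := by
  intro sd _ hpre
  unfold Spec_count_shapes count_shapes count_shapes_alt
  have hmap : (sd.map (·.1)).map
      (fun k => ((((sd.lookup k).getD []).lookup "Shape").getD "")) =
      sd.map (fun p => ((p.2.lookup "Shape").getD "")) := by
    rw [List.map_map]
    exact List.map_congr_left (fun p hp => by
      simp [lookup_self sd hpre.1 p hp])
  have := foldA_counts ((sd.map (·.1)).map
      (fun k => ((((sd.lookup k).getD []).lookup "Shape").getD ""))) 0 0 0 0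
  rw [List.foldl_map] at this
  rw [this, hmap]
  simp [PySem.List.count]
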